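-- pv_equiv track=rewrite | github.com/s-surineni/atice | hacker_earth/minimum_additions.py | find_min_addtions
-- ===== SOURCE A (Python) =====
-- def find_min_addtions(arr, lim):
--     wsum = sum(arr)
--     arlen = len(arr)
--     num_to_add = 0
--     while wsum // arlen > lim:
--         wsum += 1
--         arlen += 1
--         num_to_add += 1
--     return num_to_add
-- ===== SOURCE B (Python) =====
-- def find_min_addtions(arr, lim):
--     # closed form: minimal k >= 0 with (sum+k) // (len+k) <= lim
--     d = sum(arr) - (lim + 1) * len(arr)
--     return 0 if d < 0 else d // lim + 1
-- ===== Notes on version B (the rewrite author's own statement) =====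
-- stated objective: simpler
-- what changed: Replaces the one-unit-at-a-time simulation loop with a closed form solving (sum+k) < (lim+1)(len+k) for the minimal k >= 0.
import Mathlib
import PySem

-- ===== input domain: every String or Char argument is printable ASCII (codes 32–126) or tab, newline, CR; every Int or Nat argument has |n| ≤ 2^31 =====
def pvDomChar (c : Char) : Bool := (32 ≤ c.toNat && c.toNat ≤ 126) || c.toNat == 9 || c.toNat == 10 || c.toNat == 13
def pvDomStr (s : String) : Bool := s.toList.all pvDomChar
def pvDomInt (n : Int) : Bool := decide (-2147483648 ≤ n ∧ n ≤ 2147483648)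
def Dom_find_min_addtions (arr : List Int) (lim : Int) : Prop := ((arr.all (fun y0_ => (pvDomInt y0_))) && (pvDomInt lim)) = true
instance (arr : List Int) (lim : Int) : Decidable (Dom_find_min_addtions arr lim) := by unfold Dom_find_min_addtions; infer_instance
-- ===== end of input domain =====

-- B replaces A's unit-step simulation loop with a closed-form solution of the inequality; equal wherever A returns.
-- ===== PORT A =====
-- the while loop, as fuel-bounded recursion over the same state (wsum, arlen, num_to_add);
-- the fuel is a bound on the number of iterations, sufficient on every input where A terminates
def pvLoopA (lim : Int) : Nat → Int → Int → Int → Int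
  | 0, _, _, num => num
  | fuel + 1, wsum, arlen, num =>
    if PySem.Int.floordiv wsum arlen > lim then
      pvLoopA lim fuel (wsum + 1) (arlen + 1) (num + 1)
    else num

def find_min_addtions (arr : List Int) (lim : Int) : Int :=
  let wsum := arr.sum
  let arlen : Int := arr.length
  pvLoopA lim ((wsum - (lim + 1) * arlen + 1).toNat + 1) wsum arlen 0

-- ===== PORT B =====
def find_min_addtions_alt (arr : List Int) (lim : Int) : Int :=
  let d := arr.sum - (lim + 1) * arr.length
  if d < 0 then 0 else PySem.Int.floordiv d lim + 1

-- ===== PRECONDITION & SPEC =====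
-- Pre_ excludes exactly the inputs where A does not return: the empty list (ZeroDivisionError)
-- and the inputs where the loop never terminates (average already above lim while lim ≤ 0).
def Pre_find_min_addtions (arr : List Int) (lim : Int) : Prop :=
  arr ≠ [] ∧ (arr.sum < (lim + 1) * arr.length ∨ 1 ≤ lim)
instance (arr : List Int) (lim : Int) : Decidable (Pre_find_min_addtions arr lim) := by
  unfold Pre_find_min_addtions; infer_instance
def pvWitness_find_min_addtions : List Int × Int := ([7, 3], 2)
def Spec_find_min_addtions (arr : List Int) (lim : Int) (out : Int) : Prop := out = find_min_addtions_alt arr lim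
instance (arr : List Int) (lim : Int) (out : Int) : Decidable (Spec_find_min_addtions arr lim out) := by unfold Spec_find_min_addtions; infer_instance

-- ===== CLAIM (what is proved, stated in full; the proofs are below) =====
def Claim_equal_find_min_addtions : Prop := ∀ (arr : List Int) (lim : Int), Dom_find_min_addtions arr lim → Pre_find_min_addtions arr lim → Spec_find_min_addtions arr lim (find_min_addtions arr lim)

-- ===== LEMMAS AND PROOFS =====

-- value of B's closed form, as a function of the loop state
def pvG (lim wsum arlen : Int) : Int :=
  if wsum - (lim + 1) * arlen < 0 then 0
  else PySem.Int.floordiv (wsum - (lim + 1) * arlen) lim + 1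

lemma pvG_pos {lim wsum arlen : Int} (h : ¬ wsum - (lim + 1) * arlen < 0) (hl : 1 ≤ lim) :
    1 ≤ pvG lim wsum arlen := by
  unfold pvG
  rw [if_neg h]
  have := (PySem.Int.le_floordiv_iff_mul_le (a := wsum - (lim + 1) * arlen)
    (b := lim) (q := 0) (by omega)).mpr (by omega)
  omega

lemma pvG_step {lim wsum arlen : Int} (h : ¬ wsum - (lim + 1) * arlen < 0) (hl : 1 ≤ lim) :
    pvG lim (wsum + 1) (arlen + 1) = pvG lim wsum arlen - 1 := by
  have hd : wsum + 1 - (lim + 1) * (arlen + 1) = wsum - (lim + 1) * arlen - lim := by ring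
  unfold pvG
  rw [hd, if_neg h]
  by_cases hlt : wsum - (lim + 1) * arlen - lim < 0
  · rw [if_pos hlt]
    have h0 : PySem.Int.floordiv (wsum - (lim + 1) * arlen) lim = 0 := by
      rw [PySem.Int.floordiv_eq_iff_of_pos (by omega)]
      constructor <;> omega
    omega
  · rw [if_neg hlt]
    have hstep : PySem.Int.floordiv (wsum - (lim + 1) * arlen - lim) lim
        = PySem.Int.floordiv (wsum - (lim + 1) * arlen) lim - 1 := by
      rw [PySem.Int.floordiv_eq_ediv_of_pos (by omega),
          PySem.Int.floordiv_eq_ediv_of_pos (by omega)]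
      have h2 : wsum - (lim + 1) * arlen - lim
          = wsum - (lim + 1) * arlen + (-1) * lim := by ring
      rw [h2, Int.add_mul_ediv_right _ _ (by omega : lim ≠ 0)]
      omega
    omega

lemma pvCond_iff {lim wsum arlen : Int} (ha : 1 ≤ arlen) :
    PySem.Int.floordiv wsum arlen > lim ↔ ¬ wsum - (lim + 1) * arlen < 0 := by
  have h := PySem.Int.le_floordiv_iff_mul_le (a := wsum) (b := arlen) (q := lim + 1)
    (by omega : 0 < arlen)
  constructor <;> intro hx
  · have := h.mp (by omega); omega
  · have := h.mpr (by omega); omega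

lemma pvLoopA_eq_pvG (lim : Int) (fuel : Nat) :
    ∀ wsum arlen num : Int, 1 ≤ arlen →
      (wsum - (lim + 1) * arlen < 0 ∨ 1 ≤ lim) →
      pvG lim wsum arlen ≤ (fuel : Int) →
      pvLoopA lim fuel wsum arlen num = num + pvG lim wsum arlen := by
  induction fuel with
  | zero =>
    intro wsum arlen num ha hok hfuel
    have hd : wsum - (lim + 1) * arlen < 0 := by
      rcases hok with hd | hl
      · exact hd
      · by_contra h
        have := pvG_pos h hl
        simp at hfuel; omega
    unfold pvLoopA pvG
    rw [if_pos hd]; ring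
  | succ n ih =>
    intro wsum arlen num ha hok hfuel
    by_cases hc : PySem.Int.floordiv wsum arlen > lim
    · have hd : ¬ wsum - (lim + 1) * arlen < 0 := (pvCond_iff ha).mp hc
      have hl : 1 ≤ lim := hok.elim (fun h => absurd h hd) id
      rw [pvLoopA, if_pos hc,
        ih (wsum + 1) (arlen + 1) (num + 1) (by omega) (Or.inr hl)
          (by rw [pvG_step hd hl]; push_cast at hfuel ⊢; omega),
        pvG_step hd hl]
      ring
    · have hd : wsum - (lim + 1) * arlen < 0 := by
        by_contra h; exact hc ((pvCond_iff ha).mpr h)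
      rw [pvLoopA, if_neg hc]
      unfold pvG; rw [if_pos hd]; ring

-- ===== VERDICT (by name: the statement is the Claim_ definition above) =====
theorem find_min_addtions_spec : Claim_equal_find_min_addtions := by
  intro arr lim _ hpre
  obtain ⟨hne, hok⟩ := hpre
  unfold Spec_find_min_addtions find_min_addtions find_min_addtions_alt
  have ha : (1:Int) ≤ (arr.length : Int) := by
    have : arr.length ≠ 0 := by simpa using hne
    omega
  have hok' : arr.sum - (lim + 1) * (arr.length : Int) < 0 ∨ 1 ≤ lim :=
    hok.elim (fun h => Or.inl (by omega)) Or.inr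
  have hfuel : pvG lim arr.sum (arr.length : Int)
      ≤ (((arr.sum - (lim + 1) * (arr.length : Int) + 1).toNat + 1 : Nat) : Int) := by
    unfold pvG
    by_cases hd : arr.sum - (lim + 1) * (arr.length : Int) < 0
    · rw [if_pos hd]; positivity
    · rw [if_neg hd]
      have hl : 1 ≤ lim := hok'.elim (fun h => absurd h hd) id
      have h1 : PySem.Int.floordiv (arr.sum - (lim + 1) * (arr.length : Int)) lim
          ≤ arr.sum - (lim + 1) * (arr.length : Int) := by
        rw [PySem.Int.floordiv_eq_ediv_of_pos (by omega)]
        exact Int.ediv_le_self _ (by omega)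
      push_cast; omega
  rw [pvLoopA_eq_pvG lim _ arr.sum (arr.length : Int) 0 ha hok' hfuel]
  unfold pvG
  rw [zero_add]
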